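-- pv_equiv track=rewrite | github.com/AndresWick/Python | 21.py | definirValor
-- ===== SOURCE A (Python) =====
-- def definirValor(b):
--     if any(s for s in b if "2_" in b):
--         return 2;
--     elif any(s for s in b if "3_" in b):
--         return 3;
--     elif any(s for s in b if "4_" in b):
--         return 4;
--     elif any(s for s in b if "5_" in b):
--         return 5;
--     elif any(s for s in b if "6_" in b):
--         return 6;
--     elif any(s for s in b if "7_" in b):
--         return 7;
--     elif any(s for s in b if "8_" in b):
--         return 8;
--     elif any(s for s in b if "9_" in b):
--         return 9;
--     elif any(s for s in b if "10_" in b):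
--         return 10;
--     elif any(s for s in b if "J_" in b):
--         return 11;
--     elif any(s for s in b if "Q_" in b):
--         return 12;
--     elif any(s for s in b if "K_" in b):
--         return 13;
--     else:
--         return 0;
-- ===== SOURCE B (Python) =====
-- _VAL = {"2_": 2, "3_": 3, "4_": 4, "5_": 5, "6_": 6, "7_": 7,
--         "8_": 8, "9_": 9, "10_": 10, "J_": 11, "Q_": 12, "K_": 13}
--
-- def definirValor(b):
--     # single pass over b: the smallest card value present wins (A's branch
--     # order is ascending in value, so "first matching branch" = minimum).
--     best = 14
--     for s in b:
--         v = _VAL.get(s, 14)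
--         if v < best:
--             best = v
--     return 0 if best == 14 else best
-- ===== Notes on version B (the rewrite author's own statement) =====
-- stated objective: faster
-- what changed: Replaces A's 12 ordered if/elif branches of any(...) generators (each branch re-tests exact list membership of its token once per element of b, quadratic per branch) with a single left-to-right pass over b that keeps the minimum card value found via one dict lookup per element; this is correct because A's branch order is ascending in value, so the first matching branch equals the minimum value present.
import Mathlib
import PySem

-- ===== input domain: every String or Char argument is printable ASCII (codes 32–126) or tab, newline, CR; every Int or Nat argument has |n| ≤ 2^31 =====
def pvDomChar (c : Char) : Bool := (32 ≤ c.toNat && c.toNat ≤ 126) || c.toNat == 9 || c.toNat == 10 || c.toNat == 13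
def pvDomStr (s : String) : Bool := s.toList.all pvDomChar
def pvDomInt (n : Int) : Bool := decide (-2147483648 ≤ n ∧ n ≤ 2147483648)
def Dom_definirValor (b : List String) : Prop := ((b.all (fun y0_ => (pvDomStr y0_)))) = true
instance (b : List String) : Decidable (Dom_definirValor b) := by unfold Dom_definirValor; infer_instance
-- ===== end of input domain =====

-- ===== PORT A =====
-- B replaces A's 12 ordered any(...) if/elif branches by ONE pass over b that
-- keeps the minimum card value seen (dict lookup per element); simpler/alternative.
-- Literal port of A: each branch is any(s for s in b if "tok" in b), i.e. "is
-- there a truthy s in b and tok an element of b" (Python `in` on a list is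
-- element equality; a string s is truthy iff nonempty).
def definirValor (b : List String) : Int :=
  if b.any (fun s => b.contains "2_" && s != "") then 2
  else if b.any (fun s => b.contains "3_" && s != "") then 3
  else if b.any (fun s => b.contains "4_" && s != "") then 4
  else if b.any (fun s => b.contains "5_" && s != "") then 5
  else if b.any (fun s => b.contains "6_" && s != "") then 6
  else if b.any (fun s => b.contains "7_" && s != "") then 7
  else if b.any (fun s => b.contains "8_" && s != "") then 8
  else if b.any (fun s => b.contains "9_" && s != "") then 9
  else if b.any (fun s => b.contains "10_" && s != "") then 10
  else if b.any (fun s => b.contains "J_" && s != "") then 11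
  else if b.any (fun s => b.contains "Q_" && s != "") then 12
  else if b.any (fun s => b.contains "K_" && s != "") then 13
  else 0

-- ===== PORT B =====
-- the module-level dict _VAL of Source B
def valDict : PySem.Dict String Int :=
  PySem.Dict.ofList [("2_", 2), ("3_", 3), ("4_", 4), ("5_", 5), ("6_", 6), ("7_", 7),
                     ("8_", 8), ("9_", 9), ("10_", 10), ("J_", 11), ("Q_", 12), ("K_", 13)]

def definirValor_alt (b : List String) : Int :=
  let best := b.foldl (fun best s =>
    let v := valDict.getD s 14
    if v < best then v else best) 14
  if best = 14 then 0 else best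

-- ===== PRECONDITION & SPEC =====
def Spec_definirValor (b : List String) (out : Int) : Prop := out = definirValor_alt b
instance (b : List String) (out : Int) : Decidable (Spec_definirValor b out) := by unfold Spec_definirValor; infer_instance

-- ===== CLAIM (what is proved, stated in full; the proofs are below) =====
def Claim_equal_definirValor : Prop := ∀ (b : List String), Dom_definirValor b → Spec_definirValor b (definirValor b)

-- ===== LEMMAS AND PROOFS =====

-- proof-side table (A's branch order with its values) and plain assoc lookup
def cardTable : List (String × Int) :=
  [("2_", 2), ("3_", 3), ("4_", 4), ("5_", 5), ("6_", 6), ("7_", 7),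
   ("8_", 8), ("9_", 9), ("10_", 10), ("J_", 11), ("Q_", 12), ("K_", 13)]

def chainT : List (String × Int) → List String → Int
  | [], _ => 0
  | (t, v) :: R, b => if b.contains t then v else chainT R b

def look : List (String × Int) → String → Int
  | [], _ => 14
  | (t, v) :: R, s => if t = s then v else look R s

-- minimum of g over b, base 14 (right fold; B's left fold is reduced to it)
def Mmin (g : String → Int) : List String → Int
  | [] => 14
  | s :: r => min (g s) (Mmin g r)

theorem Mmin_le14 (g : String → Int) (b : List String) : Mmin g b ≤ 14 := by
  induction b with
  | nil => simp [Mmin]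
  | cons s r ih => simp [Mmin]; omega

theorem Mmin_ge (g : String → Int) (v : Int) (h : ∀ s, v ≤ g s) (b : List String)
    (hv : v ≤ 14) : v ≤ Mmin g b := by
  induction b with
  | nil => simpa [Mmin]
  | cons s r ih => have := h s; simp [Mmin]; omega

theorem foldl_to_Mmin (g : String → Int) (b : List String) :
    ∀ a : Int, a ≤ 14 →
      b.foldl (fun best s => if g s < best then g s else best) a = min a (Mmin g b) := by
  induction b with
  | nil => intro a ha; simp [Mmin]; omega
  | cons s r ih =>
    intro a ha
    have h1 : (if g s < a then g s else a) = min a (g s) := by split_ifs <;> omega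
    have h2 : min a (g s) ≤ 14 := by omega
    simp only [List.foldl_cons, h1, ih _ h2, Mmin]
    omega

theorem look_cases (R : List (String × Int)) (s : String) :
    look R s = 14 ∨ ∃ q ∈ R, look R s = q.2 := by
  induction R with
  | nil => left; rfl
  | cons p R ih =>
    obtain ⟨t, v⟩ := p
    by_cases h : t = s
    · right; exact ⟨(t, v), by simp, by simp [look, h]⟩
    · rcases ih with h14 | ⟨q, hq, he⟩
      · left; simp [look, h, h14]
      · right; exact ⟨q, by simp [hq], by simp [look, h, he]⟩

theorem look_not_mem (R : List (String × Int)) (t : String)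
    (h : ∀ q ∈ R, q.1 ≠ t) : look R t = 14 := by
  induction R with
  | nil => rfl
  | cons p R ih =>
    have h1 : p.1 ≠ t := h p (by simp)
    have : look R t = 14 := ih (fun q hq => h q (by simp [hq]))
    obtain ⟨a, v⟩ := p
    simpa [look, h1] using this

theorem Mmin_cons (t : String) (v : Int) (R : List (String × Int))
    (h : look R t = 14) (b : List String) :
    Mmin (look ((t, v) :: R)) b = if t ∈ b then min v (Mmin (look R) b) else Mmin (look R) b := by
  induction b with
  | nil => simp [Mmin]
  | cons s r ih =>
    have hle : Mmin (look R) r ≤ 14 := Mmin_le14 _ _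
    have hlk : look ((t, v) :: R) s = if t = s then v else look R s := rfl
    rw [Mmin, Mmin, ih, hlk]
    by_cases hts : t = s
    · subst hts
      rw [if_pos rfl, h, if_pos (List.mem_cons_self)]
      by_cases hm : t ∈ r <;> simp [hm] <;> omega
    · rw [if_neg hts]
      have hmem : (t ∈ s :: r) ↔ t ∈ r := by simp [hts]
      rw [if_congr hmem rfl rfl]
      by_cases hm : t ∈ r <;> simp [hm] <;> omega

theorem chainT_eq_Mmin (T : List (String × Int)) (b : List String)
    (hv : ∀ p ∈ T, 0 < p.2 ∧ p.2 < 14)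
    (hp : T.Pairwise (fun p q => p.2 ≤ q.2 ∧ p.1 ≠ q.1)) :
    chainT T b = if Mmin (look T) b = 14 then 0 else Mmin (look T) b := by
  induction T with
  | nil =>
    have : Mmin (look []) b = 14 := by
      have h1 := Mmin_le14 (look []) b
      have h2 := Mmin_ge (look []) 14 (fun s => by simp [look]) b (by omega)
      omega
    simp [chainT, this]
  | cons p R ih =>
    obtain ⟨t, v⟩ := p
    rcases List.pairwise_cons.mp hp with ⟨hhead, htail⟩
    have hlookt : look R t = 14 :=
      look_not_mem R t (fun q hq => Ne.symm (hhead q hq).2)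
    have hvv : 0 < v ∧ v < 14 := hv (t, v) (by simp)
    have hRv : ∀ p ∈ R, 0 < p.2 ∧ p.2 < 14 := fun q hq => hv q (by simp [hq])
    rw [Mmin_cons t v R hlookt b]
    by_cases hm : t ∈ b
    · have hge : v ≤ Mmin (look R) b := by
        apply Mmin_ge
        · intro s
          rcases look_cases R s with h14 | ⟨q, hq, he⟩
          · omega
          · have := (hhead q hq).1; omega
        · omega
      have hcont : b.contains t = true := by simpa using hm
      simp only [chainT, hcont, if_pos, if_pos hm]
      have : min v (Mmin (look R) b) = v := by omega
      rw [this]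
      omega
    · have hcont : b.contains t = false := by simpa using hm
      simp only [chainT, hcont, Bool.false_eq_true, if_false, if_neg hm]
      exact ih hRv htail

-- A's guard `any(s for s in b if tok in b)` equals plain membership of tok:
-- if tok ∈ b then tok itself is a truthy (nonempty) witness.
theorem any_guard_eq (b : List String) (t : String) (ht : t ≠ "") :
    b.any (fun s => b.contains t && s != "") = b.contains t := by
  cases h : b.contains t with
  | false => simp [List.any_eq_true, h]
  | true =>
    have hm : t ∈ b := by simpa using h
    apply List.any_eq_true.mpr
    exact ⟨t, hm, by simp [hm, ht]⟩

theorem getD_eq_look (s : String) : valDict.getD s 14 = look cardTable s := by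
  by_cases h2 : s = "2_"; · subst h2; decide
  by_cases h3 : s = "3_"; · subst h3; decide
  by_cases h4 : s = "4_"; · subst h4; decide
  by_cases h5 : s = "5_"; · subst h5; decide
  by_cases h6 : s = "6_"; · subst h6; decide
  by_cases h7 : s = "7_"; · subst h7; decide
  by_cases h8 : s = "8_"; · subst h8; decide
  by_cases h9 : s = "9_"; · subst h9; decide
  by_cases h10 : s = "10_"; · subst h10; decide
  by_cases hJ : s = "J_"; · subst hJ; decide
  by_cases hQ : s = "Q_"; · subst hQ; decide
  by_cases hK : s = "K_"; · subst hK; decide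
  have hl : look cardTable s = 14 := by
    simp [cardTable, look, Ne.symm h2, Ne.symm h3, Ne.symm h4, Ne.symm h5, Ne.symm h6,
          Ne.symm h7, Ne.symm h8, Ne.symm h9, Ne.symm h10, Ne.symm hJ, Ne.symm hQ, Ne.symm hK]
  rw [hl]
  simp [valDict, PySem.Dict.ofList, PySem.Dict.update, PySem.Dict.getD_insert,
        PySem.Dict.getD_empty, h2, h3, h4, h5, h6, h7, h8, h9, h10, hJ, hQ, hK]

-- ===== VERDICT (by name: the statement is the Claim_ definition above) =====
theorem definirValor_spec : Claim_equal_definirValor := by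
  intro b _
  unfold Spec_definirValor
  have hA : definirValor b = chainT cardTable b := by
    unfold definirValor
    rw [any_guard_eq b "2_" (by decide), any_guard_eq b "3_" (by decide),
        any_guard_eq b "4_" (by decide), any_guard_eq b "5_" (by decide),
        any_guard_eq b "6_" (by decide), any_guard_eq b "7_" (by decide),
        any_guard_eq b "8_" (by decide), any_guard_eq b "9_" (by decide),
        any_guard_eq b "10_" (by decide), any_guard_eq b "J_" (by decide),
        any_guard_eq b "Q_" (by decide), any_guard_eq b "K_" (by decide)]
    simp [cardTable, chainT]
  have hg : (fun s => valDict.getD s 14) = look cardTable := funext getD_eq_look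
  have hB : definirValor_alt b
      = if Mmin (look cardTable) b = 14 then 0 else Mmin (look cardTable) b := by
    unfold definirValor_alt
    simp only [foldl_to_Mmin (fun s => valDict.getD s 14) b 14 (by omega), hg]
    have := Mmin_le14 (look cardTable) b
    have hmin : min (14 : Int) (Mmin (look cardTable) b) = Mmin (look cardTable) b := by omega
    rw [hmin]
  rw [hA, hB]
  exact chainT_eq_Mmin cardTable b (by decide) (by decide)
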